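-- pv_equiv track=rewrite | github.com/MadGoatHaz/secure-wiki-automation | scripts/wiki_selector.py | _categorize_wikis
-- ===== SOURCE A (Python) =====
-- from typing import Dict, Any, Optional, Tuple
--
-- def _categorize_wikis(wiki_list: Dict[str, Dict[str, Any]]) -> Dict[str, list]:
--     """
--     Categorize wikis for better presentation.
--
--     Args:
--         wiki_list: Dictionary of wiki configurations
--
--     Returns:
--         Dictionary with categories as keys and lists of wiki IDs as values
--     """
--     categories = {
--         "Wikimedia Foundation": [],
--         "Technology": [],
--         "Fandom": [],
--         "Other": []
--     }
--
--     for wiki_id, wiki_config in wiki_list.items():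
--         wiki_name = wiki_config.get("name", "").lower()
--
--         # Wikimedia Foundation wikis
--         if any(name in wiki_name for name in ["wikipedia", "wiktionary", "wikibooks",
--                                               "wikiquote", "wikisource", "wikiversity",
--                                               "wikidata", "wikimedia commons"]):
--             categories["Wikimedia Foundation"].append(wiki_id)
--
--         # Technology wikis
--         elif any(name in wiki_name for name in ["arch wiki", "ubuntu wiki", "debian wiki",
--                                                 "gentoo wiki", "fedora wiki", "python wiki"]):
--             categories["Technology"].append(wiki_id)
--
--         # Fandom wikis
--         elif "fandom" in wiki_name:
--             categories["Fandom"].append(wiki_id)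
--
--         # Other wikis
--         else:
--             categories["Other"].append(wiki_id)
--
--     return categories
-- ===== SOURCE B (Python) =====
-- RULES = [
--     ("Wikimedia Foundation", ["wikipedia", "wiktionary", "wikibooks",
--                               "wikiquote", "wikisource", "wikiversity",
--                               "wikidata", "wikimedia commons"]),
--     ("Technology", ["arch wiki", "ubuntu wiki", "debian wiki",
--                     "gentoo wiki", "fedora wiki", "python wiki"]),
--     ("Fandom", ["fandom"]),
-- ]
--
-- CATEGORIES = ("Wikimedia Foundation", "Technology", "Fandom", "Other")
--
--
-- def _classify(wiki_config):
--     wiki_name = wiki_config.get("name", "").lower()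
--     return next((cat for cat, kws in RULES if any(k in wiki_name for k in kws)),
--                 "Other")
--
--
-- def _categorize_wikis(wiki_list):
--     return {cat: [wid for wid, cfg in wiki_list.items() if _classify(cfg) == cat]
--             for cat in CATEGORIES}
-- ===== Notes on version B (the rewrite author's own statement) =====
-- stated objective: simpler
-- what changed: Replaced the single-pass if/elif chain that mutates a pre-built dict with a table-driven classifier (first matching rule via next over a rule list) plus a dict comprehension that builds each bucket by filtering, so no mutable accumulator or hardcoded branch chain remains.
import Mathlib
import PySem

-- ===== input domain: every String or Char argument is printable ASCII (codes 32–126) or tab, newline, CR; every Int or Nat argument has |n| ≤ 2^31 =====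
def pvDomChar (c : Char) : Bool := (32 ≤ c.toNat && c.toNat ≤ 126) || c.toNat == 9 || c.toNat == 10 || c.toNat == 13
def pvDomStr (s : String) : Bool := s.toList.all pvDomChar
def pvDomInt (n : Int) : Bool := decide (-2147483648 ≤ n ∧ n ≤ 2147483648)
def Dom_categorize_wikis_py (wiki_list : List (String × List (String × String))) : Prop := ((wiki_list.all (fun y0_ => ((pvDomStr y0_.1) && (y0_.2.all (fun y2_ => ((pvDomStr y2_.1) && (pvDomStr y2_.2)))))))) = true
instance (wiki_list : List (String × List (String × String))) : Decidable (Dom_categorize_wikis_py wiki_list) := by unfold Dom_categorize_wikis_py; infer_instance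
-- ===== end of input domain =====

-- B replaces A's if/elif chain mutating a pre-built dict with a rule-table classifier
-- and a per-category filter comprehension (objective: simpler); same return value.


-- ===== PORT A =====
def pvKwWMF : List String :=
  ["wikipedia", "wiktionary", "wikibooks", "wikiquote", "wikisource",
   "wikiversity", "wikidata", "wikimedia commons"]

def pvKwTech : List String :=
  ["arch wiki", "ubuntu wiki", "debian wiki", "gentoo wiki", "fedora wiki",
   "python wiki"]

def categorize_wikis_py (wiki_list : List (String × List (String × String))) : List (String × List String) :=
  let categories0 : PySem.Dict String (List String) :=
    PySem.Dict.ofList [("Wikimedia Foundation", []), ("Technology", []), ("Fandom", []), ("Other", [])]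
  let categories :=
    (PySem.Dict.ofList wiki_list).items.foldl (fun cats p =>
      let wiki_name := PySem.Str.lower ((PySem.Dict.ofList p.2).getD "name" "")
      if pvKwWMF.any (fun name => PySem.Str.isIn name wiki_name) then
        cats.modify "Wikimedia Foundation" [] (fun l => l ++ [p.1])
      else if pvKwTech.any (fun name => PySem.Str.isIn name wiki_name) then
        cats.modify "Technology" [] (fun l => l ++ [p.1])
      else if PySem.Str.isIn "fandom" wiki_name then
        cats.modify "Fandom" [] (fun l => l ++ [p.1])
      else
        cats.modify "Other" [] (fun l => l ++ [p.1])) categories0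
  categories.items

-- ===== PORT B =====
def pvWmfKws : List String :=
  ["wikipedia", "wiktionary", "wikibooks", "wikiquote", "wikisource",
   "wikiversity", "wikidata", "wikimedia commons"]

def pvTechKws : List String :=
  ["arch wiki", "ubuntu wiki", "debian wiki", "gentoo wiki", "fedora wiki",
   "python wiki"]

def pvRules : List (String × List String) :=
  [("Wikimedia Foundation", pvWmfKws), ("Technology", pvTechKws), ("Fandom", ["fandom"])]

def pvCategoryKeys : List String :=
  ["Wikimedia Foundation", "Technology", "Fandom", "Other"]

def pvClassify (wiki_config : List (String × String)) : String :=
  let wiki_name := PySem.Str.lower ((PySem.Dict.ofList wiki_config).getD "name" "")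
  match pvRules.find? (fun r => r.2.any (fun k => PySem.Str.isIn k wiki_name)) with
  | some r => r.1
  | none => "Other"

def categorize_wikis_py_alt (wiki_list : List (String × List (String × String))) : List (String × List String) :=
  let items := (PySem.Dict.ofList wiki_list).items
  pvCategoryKeys.map (fun cat =>
    (cat, (items.filter (fun p => pvClassify p.2 == cat)).map (fun p => p.1)))

-- ===== PRECONDITION & SPEC =====
def Spec_categorize_wikis_py (wiki_list : List (String × List (String × String))) (out : List (String × List String)) : Prop := out = categorize_wikis_py_alt wiki_list
instance (wiki_list : List (String × List (String × String))) (out : List (String × List String)) : Decidable (Spec_categorize_wikis_py wiki_list out) := by unfold Spec_categorize_wikis_py; infer_instance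

-- ===== CLAIM (what is proved, stated in full; the proofs are below) =====
def Claim_equal_categorize_wikis_py : Prop := ∀ (wiki_list : List (String × List (String × String))), Dom_categorize_wikis_py wiki_list → Spec_categorize_wikis_py wiki_list (categorize_wikis_py wiki_list)

-- ===== LEMMAS AND PROOFS =====

-- B's rule lookup written as A's branch chain on the category name.
theorem pv_classify_eq (cfg : List (String × String)) :
    pvClassify cfg =
      (let wiki_name := PySem.Str.lower ((PySem.Dict.ofList cfg).getD "name" "")
       if pvWmfKws.any (fun name => PySem.Str.isIn name wiki_name) then "Wikimedia Foundation"
       else if pvTechKws.any (fun name => PySem.Str.isIn name wiki_name) then "Technology"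
       else if PySem.Str.isIn "fandom" wiki_name then "Fandom"
       else "Other") := by
  unfold pvClassify
  set nm := PySem.Str.lower ((PySem.Dict.ofList cfg).getD "name" "") with hnm
  simp only [pvRules, List.find?]
  by_cases h1 : pvWmfKws.any (fun name => PySem.Str.isIn name nm) <;>
  by_cases h2 : pvTechKws.any (fun name => PySem.Str.isIn name nm) <;>
  by_cases h3 : PySem.Str.isIn "fandom" nm <;>
      (try simp only [PySem.Str.isIn_eq] at h1 h2 h3 ⊢) <;>
      (try simp only [Bool.not_eq_true] at h1 h2 h3) <;>
      (try simp only [show ("fandom".toList : List Char) = ['f','a','n','d','o','m'] from rfl] at h3) <;>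
      simp [h1, h2, h3]

-- A's branch chain performs exactly the modify at B's classified category.
theorem pv_step_eq (cats : PySem.Dict String (List String)) (p : String × List (String × String)) :
    (let wiki_name := PySem.Str.lower ((PySem.Dict.ofList p.2).getD "name" "")
     if pvKwWMF.any (fun name => PySem.Str.isIn name wiki_name) then
       cats.modify "Wikimedia Foundation" [] (fun l => l ++ [p.1])
     else if pvKwTech.any (fun name => PySem.Str.isIn name wiki_name) then
       cats.modify "Technology" [] (fun l => l ++ [p.1])
     else if PySem.Str.isIn "fandom" wiki_name then
       cats.modify "Fandom" [] (fun l => l ++ [p.1])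
     else
       cats.modify "Other" [] (fun l => l ++ [p.1]))
      = cats.modify (pvClassify p.2) [] (fun l => l ++ [p.1]) := by
  rw [pv_classify_eq]
  simp only [show pvWmfKws = pvKwWMF from rfl, show pvTechKws = pvKwTech from rfl]
  split_ifs <;> rfl

theorem pv_classify_mem (cfg : List (String × String)) : pvClassify cfg ∈ pvCategoryKeys := by
  rw [pv_classify_eq]
  simp only []
  split_ifs <;> decide

theorem pv_keys_fold (l : List (String × List (String × String)))
    (d : PySem.Dict String (List String)) (hd : d.keys = pvCategoryKeys) :
    (l.foldl (fun cats p => cats.modify (pvClassify p.2) [] (fun v => v ++ [p.1])) d).keys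
      = pvCategoryKeys := by
  induction l generalizing d with
  | nil => simpa using hd
  | cons p l ih =>
    simp only [List.foldl_cons]
    apply ih
    rw [PySem.Dict.keys_modify, PySem.Dict.keys_insert_of_contains, hd]
    rw [PySem.Dict.contains_iff_mem_keys, hd]
    exact pv_classify_mem p.2

-- ===== VERDICT (by name: the statement is the Claim_ definition above) =====
theorem categorize_wikis_py_spec : Claim_equal_categorize_wikis_py := by
  intro wiki_list _
  unfold Spec_categorize_wikis_py categorize_wikis_py categorize_wikis_py_alt
  simp only
  set items := (PySem.Dict.ofList wiki_list).items with hitems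
  set d0 : PySem.Dict String (List String) :=
    PySem.Dict.ofList [("Wikimedia Foundation", []), ("Technology", []), ("Fandom", []), ("Other", [])] with hd0
  have hstep : (items.foldl (fun cats p =>
      let wiki_name := PySem.Str.lower ((PySem.Dict.ofList p.2).getD "name" "")
      if pvKwWMF.any (fun name => PySem.Str.isIn name wiki_name) then
        cats.modify "Wikimedia Foundation" [] (fun l => l ++ [p.1])
      else if pvKwTech.any (fun name => PySem.Str.isIn name wiki_name) then
        cats.modify "Technology" [] (fun l => l ++ [p.1])
      else if PySem.Str.isIn "fandom" wiki_name then
        cats.modify "Fandom" [] (fun l => l ++ [p.1])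
      else
        cats.modify "Other" [] (fun l => l ++ [p.1])) d0)
      = items.foldl (fun cats p => cats.modify (pvClassify p.2) [] (fun v => v ++ [p.1])) d0 := by
    have hf : (fun (cats : PySem.Dict String (List String)) (p : String × List (String × String)) =>
        let wiki_name := PySem.Str.lower ((PySem.Dict.ofList p.2).getD "name" "")
        if pvKwWMF.any (fun name => PySem.Str.isIn name wiki_name) then
          cats.modify "Wikimedia Foundation" [] (fun l => l ++ [p.1])
        else if pvKwTech.any (fun name => PySem.Str.isIn name wiki_name) then
          cats.modify "Technology" [] (fun l => l ++ [p.1])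
        else if PySem.Str.isIn "fandom" wiki_name then
          cats.modify "Fandom" [] (fun l => l ++ [p.1])
        else
          cats.modify "Other" [] (fun l => l ++ [p.1]))
        = fun cats p => cats.modify (pvClassify p.2) [] (fun v => v ++ [p.1]) :=
      funext fun cats => funext fun p => pv_step_eq cats p
    rw [hf]
  rw [hstep]
  set F := items.foldl (fun cats p => cats.modify (pvClassify p.2) [] (fun v => v ++ [p.1])) d0 with hF
  have hkeys : F.keys = pvCategoryKeys := pv_keys_fold items d0 (by decide)
  have hnd : F.keys.Nodup := by rw [hkeys]; decide
  rw [PySem.Dict.items_eq_map_keys F hnd [], hkeys]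
  apply List.map_congr_left
  intro c hc
  have hgetD : F.getD c [] = d0.getD c [] ++
      ((items.map (fun p => (pvClassify p.2, p.1))).filter (fun q => q.1 == c)).map (fun q => q.2) := by
    rw [hF, ← PySem.Dict.getD_foldl_modify_append (items.map (fun p => (pvClassify p.2, p.1))) d0 c,
        List.foldl_map]
  have hd0c : d0.getD c [] = [] := by
    simp only [pvCategoryKeys, List.mem_cons, List.not_mem_nil, or_false] at hc
    rcases hc with rfl | rfl | rfl | rfl <;> decide
  rw [hgetD, hd0c, List.filter_map, List.map_map]
  simp [Function.comp_def]
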